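-- pv_equiv track=rewrite | github.com/samarthraj/Question_Solve | Q3_180225.py | solve
-- ===== SOURCE A (Python) =====
-- def solve(arr, k):
--
--     score = 0
--     m = max(arr)
--
--     while k > 0:
--         score += m
--         m += 1
--         k -= 1
--
--     return score
-- ===== SOURCE B (Python) =====
-- def solve(arr, k):
--     m = max(arr)
--     if k <= 0:
--         return 0
--     return k * m + k * (k - 1) // 2
-- ===== Notes on version B (the rewrite author's own statement) =====
-- stated objective: faster
-- what changed: Replaces the k-step accumulation loop with the arithmetic-series closed form k*max + k*(k-1)//2.
import Mathlib
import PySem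

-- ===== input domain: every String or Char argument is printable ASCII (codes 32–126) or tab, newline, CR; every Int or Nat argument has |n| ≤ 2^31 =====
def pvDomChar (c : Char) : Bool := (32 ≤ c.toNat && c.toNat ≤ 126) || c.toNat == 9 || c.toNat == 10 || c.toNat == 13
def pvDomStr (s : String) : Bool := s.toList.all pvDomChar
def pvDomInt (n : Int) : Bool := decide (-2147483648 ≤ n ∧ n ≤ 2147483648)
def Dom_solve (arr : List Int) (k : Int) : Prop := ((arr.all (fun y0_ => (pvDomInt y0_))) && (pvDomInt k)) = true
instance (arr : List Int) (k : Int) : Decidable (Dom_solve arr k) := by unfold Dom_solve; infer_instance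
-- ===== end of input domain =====

-- B replaces A's k-step accumulation loop by the arithmetic-series closed form (faster).

-- ===== PORT A =====
-- the while loop: state (score, m, k), iterate while k > 0
def solveLoop (score m k : Int) : Int :=
  if k > 0 then solveLoop (score + m) (m + 1) (k - 1) else score
termination_by k.toNat
decreasing_by omega

def solve (arr : List Int) (k : Int) : Int :=
  let m := (PySem.List.max? arr (fun y => y)).getD 0  -- max(arr); Pre_ excludes arr = [] where Python raises
  solveLoop 0 m k

-- ===== PORT B =====
def solve_alt (arr : List Int) (k : Int) : Int :=
  let m := (PySem.List.max? arr (fun y => y)).getD 0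
  if k ≤ 0 then 0 else k * m + PySem.Int.floordiv (k * (k - 1)) 2

-- ===== PRECONDITION & SPEC =====
-- Pre_ excludes the empty list, on which max(arr) raises ValueError in both A and B.
def Pre_solve (arr : List Int) (k : Int) : Prop := arr ≠ []
instance (arr : List Int) (k : Int) : Decidable (Pre_solve arr k) := by unfold Pre_solve; infer_instance
def pvWitness_solve : List Int × Int := ([3, 1, 2], 4)

def Spec_solve (arr : List Int) (k : Int) (out : Int) : Prop := out = solve_alt arr k
instance (arr : List Int) (k : Int) (out : Int) : Decidable (Spec_solve arr k out) := by unfold Spec_solve; infer_instance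

-- ===== CLAIM (what is proved, stated in full; the proofs are below) =====
def Claim_equal_solve : Prop := ∀ (arr : List Int) (k : Int), Dom_solve arr k → Pre_solve arr k → Spec_solve arr k (solve arr k)

-- ===== LEMMAS AND PROOFS =====
theorem solveLoop_closed (n : Nat) : ∀ (score m : Int),
    solveLoop score m (n : Int) = score + n * m + (n * (n - 1)) / 2 := by
  induction n with
  | zero => intro score m; rw [solveLoop]; norm_num
  | succ p ih =>
      intro score m
      rw [solveLoop]
      have hpos : ((p : Int) + 1) > 0 := by positivity
      push_cast
      simp only [show ((p : Int) + 1) > 0 from hpos, if_pos, add_sub_cancel_right]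
      rw [ih]
      have h2 : (2 : Int) ∣ (p : Int) * ((p : Int) - 1) := Int.even_mul_pred_self p |>.two_dvd
      have h2' : (2 : Int) ∣ ((p : Int) + 1) * ((p : Int) + 1 - 1) := by
        have := (Int.even_mul_succ_self (p : Int)).two_dvd; ring_nf; ring_nf at this
        omega
      obtain ⟨a, ha⟩ := h2
      obtain ⟨b, hb⟩ := h2'
      have hb' : ((p : Int) + 1) * (p : Int) = 2 * b := by linarith [hb]
      rw [ha, hb', Int.mul_ediv_cancel_left _ (by norm_num), Int.mul_ediv_cancel_left _ (by norm_num)]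
      nlinarith [ha, hb']

theorem solveLoop_eq (m k : Int) :
    solveLoop 0 m k = if k ≤ 0 then 0 else k * m + PySem.Int.floordiv (k * (k - 1)) 2 := by
  by_cases hk : k ≤ 0
  · rw [solveLoop]; simp [hk, show ¬ k > 0 from by omega]
  · push_neg at hk
    have hn : k = (k.toNat : Int) := by omega
    rw [if_neg (by omega), PySem.Int.floordiv_eq_ediv_of_pos (by norm_num)]
    rw [hn, solveLoop_closed]
    ring_nf

-- ===== VERDICT (by name: the statement is the Claim_ definition above) =====
theorem solve_spec : Claim_equal_solve := by
  intro arr k _ _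
  unfold Spec_solve solve solve_alt
  exact solveLoop_eq _ k
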